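-- pv_equiv track=rewrite | github.com/KhangNguyen3000/ITI1120 | LAB5/lab5-students/pgm1.py | ah
-- ===== SOURCE A (Python) =====
-- def ah(l,x,y):
--     '''
-- (list, int, int)-> (int,int)
-- Write a function called ah(l,x,y) that
-- given a list l, and integers x and y such that x <=y, returns
-- two numbers. The first is the number of elements of l that
-- are between x and y (including x and y). The second number is
-- the minimum element of l that is between x and y (including x
-- and y).
-- '''
--     k = y
--     c = 0
--     for i in l:
--         if i >= x and i<=y:
--             c = c+1
--             if i <= k:
--                 k = i
--     return (c, k)
-- ===== SOURCE B (Python) =====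
-- def ah(l, x, y):
--     s = sorted(l)
--     i = 0
--     while i < len(s) and s[i] < x:
--         i += 1
--     j = i
--     while j < len(s) and s[j] <= y:
--         j += 1
--     if i < j:
--         return (j - i, s[i])
--     return (0, y)
-- ===== Notes on version B (the rewrite author's own statement) =====
-- stated objective: alternative
-- what changed: Replaces A's single fused loop (count and running min maintained together) with a sort-based algorithm: sort the list, advance an index past elements < x, advance a second index over elements <= y; the range is then a contiguous block whose length is the count and whose first element is the minimum.
import Mathlib
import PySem

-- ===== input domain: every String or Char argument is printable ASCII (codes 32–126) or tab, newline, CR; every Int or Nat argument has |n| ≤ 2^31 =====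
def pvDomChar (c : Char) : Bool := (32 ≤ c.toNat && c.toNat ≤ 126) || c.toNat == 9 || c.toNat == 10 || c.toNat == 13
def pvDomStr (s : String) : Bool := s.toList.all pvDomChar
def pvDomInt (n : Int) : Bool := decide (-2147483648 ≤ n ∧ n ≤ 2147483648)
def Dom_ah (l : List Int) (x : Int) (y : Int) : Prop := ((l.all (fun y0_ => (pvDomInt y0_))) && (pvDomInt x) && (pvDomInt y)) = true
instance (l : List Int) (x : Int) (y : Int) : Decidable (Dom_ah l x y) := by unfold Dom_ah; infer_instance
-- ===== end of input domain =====

-- B replaces A's fused count/min loop with a sort-based algorithm (alternative decomposition; O(n log n) vs A's O(n)).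

-- ===== PORT A =====
-- A: one fold over l carrying state (c, k), k seeded with y.
def ah (l : List Int) (x : Int) (y : Int) : Int × Int :=
  l.foldl (fun (s : Int × Int) i =>
    if i ≥ x ∧ i ≤ y then
      (s.1 + 1, if i ≤ s.2 then i else s.2)
    else s) (0, y)

-- ===== PORT B =====
-- B's first while loop: advance i past elements < x (index always in range when read, so getD is exact).
def ahSkip (s : List Int) (x : Int) (i : Nat) : Nat :=
  if i < s.length ∧ s.getD i 0 < x then ahSkip s x (i + 1) else i
termination_by s.length - i
decreasing_by omega

-- B's second while loop: advance j over elements ≤ y.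
def ahTake (s : List Int) (y : Int) (j : Nat) : Nat :=
  if j < s.length ∧ s.getD j 0 ≤ y then ahTake s y (j + 1) else j
termination_by s.length - j
decreasing_by omega

def ah_alt (l : List Int) (x : Int) (y : Int) : Int × Int :=
  let s := PySem.List.sorted l (fun v => v) false
  let i := ahSkip s x 0
  let j := ahTake s y i
  if i < j then ((j : Int) - (i : Int), s.getD i 0) else (0, y)

-- ===== PRECONDITION & SPEC =====
def Spec_ah (l : List Int) (x : Int) (y : Int) (out : Int × Int) : Prop := out = ah_alt l x y
instance (l : List Int) (x : Int) (y : Int) (out : Int × Int) : Decidable (Spec_ah l x y out) := by unfold Spec_ah; infer_instance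

-- ===== CLAIM (what is proved, stated in full; the proofs are below) =====
def Claim_equal_ah : Prop := ∀ (l : List Int) (x : Int) (y : Int), Dom_ah l x y → Spec_ah l x y (ah l x y)

-- ===== LEMMAS AND PROOFS =====

-- A's fold, characterised over the filtered list with arbitrary starting state.
theorem ah_loop_char (x y : Int) (l : List Int) : ∀ (c k : Int),
    l.foldl (fun (s : Int × Int) i =>
      if i ≥ x ∧ i ≤ y then
        (s.1 + 1, if i ≤ s.2 then i else s.2)
      else s) (c, k)
    = (c + ((l.filter (fun i => decide (x ≤ i) && decide (i ≤ y))).length : Int),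
       (l.filter (fun i => decide (x ≤ i) && decide (i ≤ y))).foldl (fun k i => min i k) k) := by
  induction l with
  | nil => simp
  | cons h t ih =>
    intro c k
    by_cases hp : h ≥ x ∧ h ≤ y
    · simp only [List.foldl_cons, List.filter_cons, hp.1, hp.2, decide_true,
        Bool.and_self, and_self, if_true]
      rw [ih, Prod.mk.injEq]
      refine ⟨by simp [List.length_cons]; ring, ?_⟩
      congr 1
    · have hb : (decide (x ≤ h) && decide (h ≤ y)) = false := by
        rcases not_and_or.mp hp with h1 | h1 <;> simp [h1]
      simp only [List.foldl_cons, List.filter_cons, if_neg hp, hb]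
      exact ih c k

-- the skip loop counts the prefix of elements < x
theorem ahSkip_eq (x : Int) (s : List Int) (i : Nat) :
    ahSkip s x i = i + ((s.drop i).takeWhile (fun v => decide (v < x))).length := by
  rw [ahSkip]
  by_cases h : i < s.length ∧ s.getD i 0 < x
  · rw [if_pos h, ahSkip_eq x s (i + 1), List.drop_eq_getElem_cons h.1, List.takeWhile_cons]
    have hg : s.getD i 0 = s[i] := List.getD_eq_getElem s 0 h.1
    rw [hg] at h
    rw [if_pos (by simp [h.2])]
    simp only [List.length_cons]
    omega
  · rw [if_neg h]
    rcases Nat.lt_or_ge i s.length with hl | hl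
    · have hg : s.getD i 0 = s[i] := List.getD_eq_getElem s 0 hl
      have hx : ¬ s[i] < x := by rw [hg] at h; tauto
      rw [List.drop_eq_getElem_cons hl, List.takeWhile_cons, if_neg (by simp [hx])]
      simp
    · rw [List.drop_eq_nil_of_le hl]; simp
termination_by s.length - i
decreasing_by omega

theorem ahTake_eq (y : Int) (s : List Int) (j : Nat) :
    ahTake s y j = j + ((s.drop j).takeWhile (fun v => decide (v ≤ y))).length := by
  rw [ahTake]
  by_cases h : j < s.length ∧ s.getD j 0 ≤ y
  · rw [if_pos h, ahTake_eq y s (j + 1), List.drop_eq_getElem_cons h.1, List.takeWhile_cons]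
    have hg : s.getD j 0 = s[j] := List.getD_eq_getElem s 0 h.1
    rw [hg] at h
    rw [if_pos (by simp [h.2])]
    simp only [List.length_cons]
    omega
  · rw [if_neg h]
    rcases Nat.lt_or_ge j s.length with hl | hl
    · have hg : s.getD j 0 = s[j] := List.getD_eq_getElem s 0 hl
      have hy : ¬ s[j] ≤ y := by rw [hg] at h; tauto
      rw [List.drop_eq_getElem_cons hl, List.takeWhile_cons, if_neg (by simp [hy])]
      simp
    · rw [List.drop_eq_nil_of_le hl]; simp
termination_by s.length - j
decreasing_by omega

theorem dropWhile_eq_drop_len (p : Int → Bool) (l : List Int) :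
    l.dropWhile p = l.drop (l.takeWhile p).length := by
  induction l with
  | nil => rfl
  | cons h t ih =>
    rw [List.dropWhile_cons, List.takeWhile_cons]
    by_cases hp : p h = true
    · simp [hp, ih]
    · simp [hp]

-- on a sorted list, the range filter is takeWhile(≤y) after dropWhile(<x)
theorem sorted_filter_range (x y : Int) (s : List Int) (hs : s.Pairwise (· ≤ ·)) :
    s.filter (fun i => decide (x ≤ i) && decide (i ≤ y))
    = (s.dropWhile (fun v => decide (v < x))).takeWhile (fun v => decide (v ≤ y)) := by
  induction s with
  | nil => rfl
  | cons h t ih =>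
    have hall : ∀ v ∈ t, h ≤ v := fun v hv => (List.pairwise_cons.mp hs).1 v hv
    have ht : t.Pairwise (· ≤ ·) := (List.pairwise_cons.mp hs).2
    rw [List.filter_cons, List.dropWhile_cons]
    by_cases hx : h < x
    · rw [if_neg (show ¬ ((decide (x ≤ h) && decide (h ≤ y)) = true) by simp; omega),
        if_pos (show decide (h < x) = true by simp [hx])]
      exact ih ht
    · have hxh : x ≤ h := by omega
      have hdt : t.dropWhile (fun v => decide (v < x)) = t := by
        apply List.dropWhile_eq_self_iff.mpr
        intro h0
        cases t with
        | nil => simp at h0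
        | cons a t' => have := hall a (by simp); simp; omega
      rw [if_neg (show ¬ (decide (h < x) = true) by simp; omega), List.takeWhile_cons]
      by_cases hy : h ≤ y
      · rw [if_pos (show (decide (x ≤ h) && decide (h ≤ y)) = true by simp [hxh, hy]),
          if_pos (show decide (h ≤ y) = true by simp [hy]), ih ht, hdt]
      · have hnone : t.filter (fun i => decide (x ≤ i) && decide (i ≤ y)) = [] := by
          apply List.filter_eq_nil_iff.mpr
          intro v hv
          have := hall v hv; simp; omega
        rw [if_neg (show ¬ ((decide (x ≤ h) && decide (h ≤ y)) = true) by simp; omega),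
          if_neg (show ¬ (decide (h ≤ y) = true) by simp; omega)]
        exact hnone

theorem foldl_min_ge (h : Int) (t : List Int) (hall : ∀ v ∈ t, h ≤ v) :
    t.foldl (fun k i => min i k) h = h := by
  induction t with
  | nil => rfl
  | cons a t' ih =>
    have ha : min a h = h := min_eq_right (hall a (by simp))
    rw [List.foldl_cons, ha]
    exact ih (fun v hv => hall v (List.mem_cons_of_mem _ hv))

-- ===== VERDICT (by name: the statement is the Claim_ definition above) =====
theorem ah_spec : Claim_equal_ah := by
  intro l x y _
  unfold Spec_ah ah ah_alt
  rw [ah_loop_char]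
  set s := PySem.List.sorted l (fun v => v) false with hsdef
  have hperm : s.Perm l := PySem.List.sorted_perm l (fun v => v) false
  have hpw : s.Pairwise (· ≤ ·) := PySem.List.sorted_pairwise l (fun v => v)
  set p : Int → Bool := fun i => decide (x ≤ i) && decide (i ≤ y) with hp
  have hpf : (l.filter p).Perm (s.filter p) := (hperm.filter p).symm
  have hlen : (l.filter p).length = (s.filter p).length := hpf.length_eq
  have hrcomm : RightCommutative (fun (k i : Int) => min i k) := by
    constructor; intro a b c
    omega
  have hfold : (l.filter p).foldl (fun k i => min i k) y
      = (s.filter p).foldl (fun k i => min i k) y :=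
    List.Perm.foldl_eq (rcomm := hrcomm) hpf y
  have hi : ahSkip s x 0 = (s.takeWhile (fun v => decide (v < x))).length := by
    rw [ahSkip_eq]; simp
  have hT : s.filter p = (s.drop (ahSkip s x 0)).takeWhile (fun v => decide (v ≤ y)) := by
    rw [sorted_filter_range x y s hpw, hi, dropWhile_eq_drop_len]
  have hj : ahTake s y (ahSkip s x 0) = ahSkip s x 0 + (s.filter p).length := by
    rw [ahTake_eq, hT]
  cases hF : s.filter p with
  | nil =>
    have hij : ¬ ahSkip s x 0 < ahTake s y (ahSkip s x 0) := by
      rw [hj, hF]; simp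
    rw [if_neg hij]
    rw [hF] at hlen hfold
    simp only [List.length_nil] at hlen
    simp only [List.foldl_nil] at hfold
    rw [hlen, hfold]
    simp
  | cons h t =>
    have hij : ahSkip s x 0 < ahTake s y (ahSkip s x 0) := by
      rw [hj, hF]; simp
    rw [if_pos hij]
    -- head of the drop
    have hdrop : s.drop (ahSkip s x 0) = h :: ((s.drop (ahSkip s x 0)).tail) := by
      rw [hT] at hF
      cases hd : s.drop (ahSkip s x 0) with
      | nil => rw [hd] at hF; simp at hF
      | cons a d =>
        rw [hd] at hF
        rw [List.takeWhile_cons] at hF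
        by_cases hay : (fun v => decide (v ≤ y)) a = true
        · rw [if_pos hay] at hF
          simp only [List.cons.injEq] at hF
          simp [hF.1]
        · rw [if_neg hay] at hF; simp at hF
    have hgd : s.getD (ahSkip s x 0) 0 = h := by
      have hlt : ahSkip s x 0 < s.length := by
        by_contra hge
        rw [List.drop_eq_nil_of_le (Nat.le_of_not_lt hge)] at hdrop
        simp at hdrop
      rw [List.getD_eq_getElem s 0 hlt]
      have := List.drop_eq_getElem_cons hlt (l := s)
      rw [this] at hdrop
      exact (List.cons.injEq _ _ _ _).mp hdrop |>.1
    -- min over the filtered list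
    have hhy : h ≤ y := by
      have : h ∈ s.filter p := by rw [hF]; simp
      have := List.of_mem_filter this
      rw [hp] at this; simp at this; exact this.2
    have hpwF : (s.filter p).Pairwise (· ≤ ·) := hpw.filter p
    have hallt : ∀ v ∈ t, h ≤ v := by
      rw [hF] at hpwF
      exact fun v hv => (List.pairwise_cons.mp hpwF).1 v hv
    have hmin : (l.filter p).foldl (fun k i => min i k) y = h := by
      rw [hfold, hF, List.foldl_cons, min_eq_left hhy]
      exact foldl_min_ge h t hallt
    rw [hmin, hgd, hlen, hj, hF]
    simp only [List.length_cons]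
    refine Prod.ext ?_ rfl
    push_cast
    ring
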